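-- pv_equiv track=rewrite | github.com/callmewenhao/leetcode | dailys/前后缀/minimumDeletions.py | minimumDeletions1
-- ===== SOURCE A (Python) =====
-- def minimumDeletions1(s: str) -> int:
--     f = cnt_b = 0
--     for i, c in enumerate(s):
--         if c == 'b':
--             cnt_b += 1
--         else:
--             f = min(f + 1, cnt_b)
--     return f
-- ===== SOURCE B (Python) =====
-- def minimumDeletions1(s: str) -> int:
--     # min over all split points: b's in prefix + non-b's ("a"s) in suffix
--     total_a = sum(1 for c in s if c != 'b')
--     best = total_a  # split before everything
--     prefix_a = prefix_b = 0
--     for c in s: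
--         if c == 'b':
--             prefix_b += 1
--         else:
--             prefix_a += 1
--         cost = prefix_b + (total_a - prefix_a)
--         if cost < best:
--             best = cost
--     return best
-- ===== Notes on version B (the rewrite author's own statement) =====
-- stated objective: alternative
-- what changed: Replaced the one-pass DP recurrence f = min(f+1, cnt_b) by a two-pass split-point enumeration: count all non-'b' chars, then scan all splits minimizing (b's in prefix) + (non-b's in suffix).
import Mathlib
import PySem

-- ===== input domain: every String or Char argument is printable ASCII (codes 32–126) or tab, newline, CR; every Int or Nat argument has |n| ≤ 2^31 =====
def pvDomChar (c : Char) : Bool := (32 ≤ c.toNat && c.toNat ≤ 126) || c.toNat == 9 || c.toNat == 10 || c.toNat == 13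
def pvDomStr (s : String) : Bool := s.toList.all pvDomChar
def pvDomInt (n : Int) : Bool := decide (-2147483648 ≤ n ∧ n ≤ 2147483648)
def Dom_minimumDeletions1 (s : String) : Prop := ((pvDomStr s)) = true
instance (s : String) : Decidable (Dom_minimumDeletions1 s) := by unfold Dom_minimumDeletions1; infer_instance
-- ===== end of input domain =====

-- B changes the decomposition: instead of A's one-pass DP it counts the non-'b' chars and
-- minimizes (b's in prefix)+(non-b's in suffix) over all split points; same value, same cost.

-- ===== PORT A =====
-- A's loop state (f, cnt_b); one step per character, branches in A's order.
def pvStepA (st : Int × Int) (c : Char) : Int × Int :=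
  if c = 'b' then (st.1, st.2 + 1) else (min (st.1 + 1) st.2, st.2)

def minimumDeletions1 (s : String) : Int :=
  (s.toList.foldl pvStepA (0, 0)).1

-- ===== PORT B =====
-- B's loop state (best, prefix_a, prefix_b); t is total_a.
def pvStepB (t : Int) (st : Int × Int × Int) (c : Char) : Int × Int × Int :=
  let pa := if c = 'b' then st.2.1 else st.2.1 + 1
  let pb := if c = 'b' then st.2.2 + 1 else st.2.2
  let cost := pb + (t - pa)
  (if cost < st.1 then cost else st.1, pa, pb)

def minimumDeletions1_alt (s : String) : Int :=
  let totalA : Int := ((s.toList.filter (fun c => c ≠ 'b')).length : Int)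
  (s.toList.foldl (pvStepB totalA) (totalA, 0, 0)).1

-- ===== PRECONDITION & SPEC =====
def Spec_minimumDeletions1 (s : String) (out : Int) : Prop := out = minimumDeletions1_alt s
instance (s : String) (out : Int) : Decidable (Spec_minimumDeletions1 s out) := by unfold Spec_minimumDeletions1; infer_instance

-- ===== CLAIM (what is proved, stated in full; the proofs are below) =====
def Claim_equal_minimumDeletions1 : Prop := ∀ (s : String), Dom_minimumDeletions1 s → Spec_minimumDeletions1 s (minimumDeletions1 s)

-- ===== LEMMAS AND PROOFS =====

def pvCntA (l : List Char) : Int := ((l.filter (fun c => c ≠ 'b')).length : Int)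
def pvCntB (l : List Char) : Int := ((l.filter (fun c => c = 'b')).length : Int)

-- Joint invariant tying A's and B's fold states after any processed prefix p:
-- B's counters are the prefix counts, A's f never exceeds cnt_b, and
-- B's best equals A's f shifted by the non-b's still ahead (t - cntA p).
theorem pv_inv (t : Int) (p : List Char) :
    (p.foldl pvStepA (0, 0)).2 = pvCntB p ∧
    (p.foldl pvStepA (0, 0)).1 ≤ pvCntB p ∧
    (p.foldl (pvStepB t) (t, 0, 0)).2.1 = pvCntA p ∧
    (p.foldl (pvStepB t) (t, 0, 0)).2.2 = pvCntB p ∧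
    (p.foldl (pvStepB t) (t, 0, 0)).1 = (p.foldl pvStepA (0, 0)).1 + (t - pvCntA p) := by
  induction p using List.reverseRecOn with
  | nil => simp [pvCntA, pvCntB]
  | append_singleton p c ih =>
    obtain ⟨h1, h2, h3, h4, h5⟩ := ih
    simp only [pvCntA, pvCntB] at h1 h2 h3 h4 h5
    by_cases hc : c = 'b' <;>
      simp [List.foldl_append, pvStepA, pvStepB, pvCntA, pvCntB, hc,
            List.filter_append, h1, h3, h4, h5, min_def] <;>
      omega

-- ===== VERDICT (by name: the statement is the Claim_ definition above) =====
theorem minimumDeletions1_spec : Claim_equal_minimumDeletions1 := by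
  intro s _
  unfold Spec_minimumDeletions1 minimumDeletions1 minimumDeletions1_alt
  have h := pv_inv (pvCntA s.toList) s.toList
  simp only [pvCntA] at h ⊢
  omega
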